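-- pv_equiv track=rewrite | github.com/Suhaszui/Legal_Insight | ipc_model/src/preprocessing.py | normalize_ipc
-- ===== SOURCE A (Python) =====
-- def normalize_ipc(sections):
--
--     if sections is None:
--         return None
--
--     cleaned = []
--
--     for sec in sections:
--
--         sec = str(sec).strip()
--         sec = sec.replace('ipc','').replace('IPC','').replace('Sec','').replace('sec','')
--         sec = sec.replace('-', '').replace('.', '').replace(' ', '')
--         sec = sec.upper()
--         cleaned.append(sec)
--
--     priority_sections = [
--         "304B","302","376","307","364A","363","326","325","324","323",
--         "354","498A","420","406","467","468","506","507","147","148","149","294","279"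
--     ]
--
--     for priority in priority_sections:
--         if priority in cleaned:
--             return f"IPC {priority}"
--
--     if cleaned:
--         return f"IPC {cleaned[0]}"
--
--     return None
-- ===== SOURCE B (Python) =====
-- _PRIORITY = [
--     "304B","302","376","307","364A","363","326","325","324","323",
--     "354","498A","420","406","467","468","506","507","147","148","149","294","279"
-- ]
-- _RANK = {p: i for i, p in enumerate(_PRIORITY)}
--
--
-- def _clean(sec):
--     sec = str(sec).strip()
--     for junk in ('ipc', 'IPC', 'Sec', 'sec', '-', '.', ' '):
--         sec = sec.replace(junk, '')
--     return sec.upper()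
--
--
-- def normalize_ipc(sections):
--     if sections is None:
--         return None
--     cleaned = [_clean(s) for s in sections]
--     found = [(_RANK[c], c) for c in cleaned if c in _RANK]
--     if found:
--         return f"IPC {min(found, key=lambda t: t[0])[1]}"
--     if cleaned:
--         return f"IPC {cleaned[0]}"
--     return None
-- ===== Notes on version B (the rewrite author's own statement) =====
-- stated objective: alternative
-- what changed: Replaces A's scan over the 23 priorities with an inner 'in cleaned' search by a rank dict built once and a single pass over cleaned collecting (rank, section) pairs, returning the pair with the minimal rank.
import Mathlib
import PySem

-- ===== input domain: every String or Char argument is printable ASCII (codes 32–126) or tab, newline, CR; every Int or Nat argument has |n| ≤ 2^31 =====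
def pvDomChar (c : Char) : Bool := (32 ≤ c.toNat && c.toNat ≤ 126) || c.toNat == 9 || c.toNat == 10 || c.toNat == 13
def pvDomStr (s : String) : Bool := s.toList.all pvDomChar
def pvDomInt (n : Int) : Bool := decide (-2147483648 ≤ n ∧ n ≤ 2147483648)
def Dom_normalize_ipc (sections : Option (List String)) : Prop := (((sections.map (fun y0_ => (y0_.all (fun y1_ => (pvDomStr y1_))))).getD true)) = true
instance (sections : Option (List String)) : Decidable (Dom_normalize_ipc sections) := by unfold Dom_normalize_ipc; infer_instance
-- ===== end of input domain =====

-- B replaces A's loop over the 23 priorities (each doing an inner 'in cleaned' scan) by a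
-- rank table built once from the priority list and ONE pass over cleaned collecting
-- (rank, section) pairs, returning the pair of minimal rank; objective: alternative.

-- ===== PORT A =====
def pvPriority : List String := [
  "304B","302","376","307","364A","363","326","325","324","323",
  "354","498A","420","406","467","468","506","507","147","148","149","294","279"]

def pvCleanA (sec : String) : String :=
  PySem.Str.upper
    (PySem.Str.replace (PySem.Str.replace (PySem.Str.replace
      (PySem.Str.replace (PySem.Str.replace (PySem.Str.replace (PySem.Str.replace
        (PySem.Str.strip sec) "ipc" "") "IPC" "") "Sec" "") "sec" "") "-" "") "." "") " " "")

def normalize_ipc (sections : Option (List String)) : Option String :=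
  match sections with
  | none => none
  | some secs =>
    let cleaned := secs.foldl (fun acc sec => acc ++ [pvCleanA sec]) []
    match pvPriority.find? (fun p => cleaned.contains p) with
    | some p => some ("IPC " ++ p)
    | none =>
      match cleaned with
      | c :: _ => some ("IPC " ++ c)
      | [] => none

-- ===== PORT B =====
def pvRank : PySem.Dict String Int :=
  PySem.Dict.ofList ((PySem.List.enumerate pvPriority 0).map (fun ip => (ip.2, ip.1)))

def pvCleanB (sec : String) : String :=
  PySem.Str.upper
    ((["ipc", "IPC", "Sec", "sec", "-", ".", " "].foldl
      (fun s j => PySem.Str.replace s j "") (PySem.Str.strip sec)))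

def normalize_ipc_alt (sections : Option (List String)) : Option String :=
  match sections with
  | none => none
  | some secs =>
    let cleaned := secs.map pvCleanB
    let found := (cleaned.filter (fun c => pvRank.contains c)).map (fun c => (pvRank.getD c 0, c))
    match PySem.List.min? found (fun t => t.1) with
    | some t => some ("IPC " ++ t.2)
    | none =>
      match cleaned with
      | c :: _ => some ("IPC " ++ c)
      | [] => none

-- ===== PRECONDITION & SPEC =====
def Spec_normalize_ipc (sections : Option (List String)) (out : Option String) : Prop := out = normalize_ipc_alt sections
instance (sections : Option (List String)) (out : Option String) : Decidable (Spec_normalize_ipc sections out) := by unfold Spec_normalize_ipc; infer_instance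

-- ===== CLAIM (what is proved, stated in full; the proofs are below) =====
def Claim_equal_normalize_ipc : Prop := ∀ (sections : Option (List String)), Dom_normalize_ipc sections → Spec_normalize_ipc sections (normalize_ipc sections)

-- ===== LEMMAS AND PROOFS =====

theorem pvClean_eq (sec : String) : pvCleanA sec = pvCleanB sec := by
  simp [pvCleanA, pvCleanB, List.foldl]

theorem pvFoldl_append_eq_map (f : String → String) (l : List String) (acc : List String) :
    l.foldl (fun a s => a ++ [f s]) acc = acc ++ l.map f := by
  induction l generalizing acc with
  | nil => simp
  | cons x t ih => simp [List.foldl, ih]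

theorem pvFind_enum (l : List String) (c : String) (s : Int) :
    Option.map (fun x => x.2)
      (List.find? (fun p => p.1 == c) ((PySem.List.enumerate l s).map (fun ip => (ip.2, ip.1)))) =
    (PySem.List.index? l c).map (fun k => s + (k : Int)) := by
  induction l generalizing s with
  | nil => simp [PySem.List.enumerate, PySem.List.index?_eq_idxOf?]
  | cons x t ih =>
    rw [PySem.List.enumerate_cons]
    by_cases h : x = c
    · subst h
      rw [PySem.List.index?_cons_self]
      simp
    · rw [PySem.List.index?_cons_of_ne t h]
      have hbeq : (x == c) = false := by simp [h]
      simp only [List.map_cons, List.find?_cons, hbeq]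
      rw [ih (s + 1)]
      cases hidx : PySem.List.index? t c with
      | none => simp
      | some k =>
        show some (s + 1 + (k : Int)) = some (s + ((k + 1 : Nat) : Int))
        push_cast
        ring_nf

theorem pvRank_items :
    pvRank.items = (PySem.List.enumerate pvPriority 0).map (fun ip => (ip.2, ip.1)) := by
  decide

theorem pvRank_get? (c : String) :
    pvRank.get? c = (PySem.List.index? pvPriority c).map (fun k => (k : Int)) := by
  show Option.map (fun x => x.2) (List.find? (fun p => p.1 == c) pvRank.items) = _
  rw [pvRank_items, pvFind_enum]
  cases h : PySem.List.index? pvPriority c <;> simp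

theorem pvContains_eq_isSome {κ ν : Type} [BEq κ] (d : PySem.Dict κ ν) (c : κ) :
    d.contains c = (d.get? c).isSome := by
  simp only [PySem.Dict.contains, PySem.Dict.get?, Option.isSome_map]
  cases h : List.find? (fun p => p.1 == c) d.items with
  | none =>
    simp only [Option.isSome_none]
    exact List.any_eq_false.2 (by simpa using List.find?_eq_none.1 h)
  | some y =>
    simp only [Option.isSome_some]
    exact List.any_eq_true.2 ⟨y, List.mem_of_find?_eq_some h, by simpa using List.find?_some h⟩

theorem pvMem_found (cleaned : List String) (x : Int × String) :
    x ∈ (cleaned.filter (fun c => pvRank.contains c)).map (fun c => (pvRank.getD c 0, c)) ↔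
      x.2 ∈ cleaned ∧ ∃ k, PySem.List.index? pvPriority x.2 = some k ∧ x.1 = (k : Int) := by
  constructor
  · intro hx
    rcases List.mem_map.1 hx with ⟨c, hc, hxe⟩
    rcases List.mem_filter.1 hc with ⟨hmem, hcontains⟩
    rw [pvContains_eq_isSome, pvRank_get? c] at hcontains
    cases hidx : PySem.List.index? pvPriority c with
    | none => rw [hidx] at hcontains; simp at hcontains
    | some k =>
      refine ⟨by rw [← hxe]; exact hmem, k, ?_, ?_⟩
      · rw [← hxe]; exact hidx
      · rw [← hxe]
        have hidx' : List.idxOf? c pvPriority = some k := by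
          simpa [PySem.List.index?_eq_idxOf?] using hidx
        simp [PySem.Dict.getD, pvRank_get? c, hidx']
  · rintro ⟨hmem, k, hidx, hx1⟩
    apply List.mem_map.2
    refine ⟨x.2, List.mem_filter.2 ⟨hmem, ?_⟩, ?_⟩
    · rw [pvContains_eq_isSome, pvRank_get? x.2, hidx]; simp
    · have hidx' : List.idxOf? x.2 pvPriority = some k := by
        simpa [PySem.List.index?_eq_idxOf?] using hidx
      have : pvRank.getD x.2 0 = (k : Int) := by
        simp [PySem.Dict.getD, pvRank_get? x.2, hidx']
      rw [this, ← hx1]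

theorem pvMain (cleaned : List String) :
    (match pvPriority.find? (fun p => cleaned.contains p) with
     | some p => some ("IPC " ++ p)
     | none =>
       match cleaned with
       | c :: _ => some ("IPC " ++ c)
       | [] => none) =
    (match PySem.List.min? ((cleaned.filter (fun c => pvRank.contains c)).map (fun c => (pvRank.getD c 0, c))) (fun t => t.1) with
     | some t => some ("IPC " ++ t.2)
     | none =>
       match cleaned with
       | c :: _ => some ("IPC " ++ c)
       | [] => none) := by
  cases hmin : PySem.List.min? ((cleaned.filter (fun c => pvRank.contains c)).map (fun c => (pvRank.getD c 0, c))) (fun t => t.1) with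
  | none =>
    have hempty := (PySem.List.min?_eq_none_iff _ _).1 hmin
    have hfind : pvPriority.find? (fun p => cleaned.contains p) = none := by
      apply List.find?_eq_none.2
      intro p hp hcont
      have hpmem : p ∈ cleaned := by simpa using hcont
      have hsome : (PySem.List.index? pvPriority p).isSome := (PySem.List.index?_isSome_iff pvPriority p).2 hp
      cases hidx : PySem.List.index? pvPriority p with
      | none => rw [hidx] at hsome; simp at hsome
      | some k =>
        have : ((k : Int), p) ∈ (cleaned.filter (fun c => pvRank.contains c)).map (fun c => (pvRank.getD c 0, c)) :=
          (pvMem_found cleaned ((k : Int), p)).2 ⟨hpmem, k, hidx, rfl⟩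
        rw [hempty] at this
        exact absurd this (List.not_mem_nil)
    rw [hfind]
  | some t =>
    obtain ⟨i, c⟩ := t
    have hmem := PySem.List.min?_mem hmin
    have hmin' := PySem.List.min?_isMin hmin
    rcases (pvMem_found cleaned (i, c)).1 hmem with ⟨hc, k, hidx, hik⟩
    rcases (PySem.List.index?_eq_some_iff pvPriority c k).1 hidx with ⟨pre, suf, hsplit, hlen, hnot⟩
    have hfind : pvPriority.find? (fun p => cleaned.contains p) = some c := by
      apply List.find?_eq_some_iff_append.2
      refine ⟨by simpa using hc, pre, suf, hsplit, ?_⟩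
      intro a ha
      simp only [Bool.not_eq_true']
      by_contra hcont
      have hamem : a ∈ cleaned := by
        simp only [Bool.not_eq_false] at hcont
        simpa using hcont
      have haidx : PySem.List.index? pvPriority a = PySem.List.index? pre a := by
        rw [hsplit]; exact PySem.List.index?_append_of_mem _ ha
      cases hja : PySem.List.index? pre a with
      | none => exact (PySem.List.index?_eq_none_iff pre a).1 hja ha
      | some j =>
        have hjlt : j < pre.length := by
          rcases PySem.List.getElem_of_index?_eq_some hja with ⟨hj, _⟩
          exact hj
        have hfound : ((j : Int), a) ∈ (cleaned.filter (fun c => pvRank.contains c)).map (fun c => (pvRank.getD c 0, c)) := by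
          apply (pvMem_found cleaned ((j : Int), a)).2
          exact ⟨hamem, j, by rw [haidx, hja], rfl⟩
        have := hmin' _ hfound
        simp only at this
        omega
    rw [hfind]

-- ===== VERDICT (by name: the statement is the Claim_ definition above) =====
theorem normalize_ipc_spec : Claim_equal_normalize_ipc := by
  intro sections _
  unfold Spec_normalize_ipc normalize_ipc normalize_ipc_alt
  cases sections with
  | none => rfl
  | some secs =>
    simp only
    rw [pvFoldl_append_eq_map pvCleanA secs []]
    have hmap : secs.map pvCleanA = secs.map pvCleanB := by
      simp [pvClean_eq]
    rw [List.nil_append, hmap]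
    exact pvMain (secs.map pvCleanB)
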